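-- pv_equiv track=rewrite | github.com/UWPRG/Nance_Enzyme_Encap_MD | Prot_poly_analysis/prot_polymer_analysis.py | AA_list_org
-- ===== SOURCE A (Python) =====
-- def AA_list_org(lorg_list):
--
--     """List elements need have 'GLY  XX' as string format, where XX reps the number of GLY residues. Output is a
--     sorted list of 'AA XX' according to the below order.  """
--
--     hydrophobic_res = ['ALA', 'ILE', 'LEU', 'VAL', 'GLY', 'PRO','PHE', 'TRP','MET']
--     polar_res = ['ASN', 'CYS', 'GLN', 'SER', 'THR','TYR']
--     neg_res = ['ASP', 'GLU']
--     pos_res = ['ARG', 'HIS', 'LYS']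
--
--     all_res = [pos_res, neg_res, polar_res, hydrophobic_res]
--     #Change order of residues before making the bar graph
--     # (1) Positively charged
--     # (2) Negatively charged
--     # (3) Polar residues
--     # (4) Hydrophobic residues
--
--     # This chunk of code sorts the counts of each AA that have 1001 or 1002 frame count based
--     # on the AA order in all_res
--     arr_list = []
--
--     for row in all_res:
--         for i in range(len(lorg_list)):
--             for j in range(len(row)):
--                 if row[j] == lorg_list[i][0:3]:
--                     arr_list.append(lorg_list[i])
--
--     #This chunk of code splits the list arr_list to makes the AA: count of 1001 or 1002 frames data plottable
--     f_list = []
--     fn_list = []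
--     for i in range(len(arr_list)):
--         f_list.append(arr_list[i][0:3])
--         fn_list.append(int(arr_list[i][5:]))
--
--     return f_list, fn_list
-- ===== SOURCE B (Python) =====
-- def AA_list_org(lorg_list):
--     """Single bucketing pass: map each 3-letter code to its group rank via a dict,
--     append to the rank's bucket, then concatenate buckets and split names/counts."""
--     groups = (['ARG', 'HIS', 'LYS'],
--               ['ASP', 'GLU'],
--               ['ASN', 'CYS', 'GLN', 'SER', 'THR', 'TYR'],
--               ['ALA', 'ILE', 'LEU', 'VAL', 'GLY', 'PRO', 'PHE', 'TRP', 'MET'])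
--     rank = {}
--     for g, codes in enumerate(groups):
--         for c in codes:
--             rank[c] = g
--     buckets = [[], [], [], []]
--     for s in lorg_list:
--         g = rank.get(s[:3])
--         if g is not None:
--             buckets[g].append(s)
--     ordered = buckets[0] + buckets[1] + buckets[2] + buckets[3]
--     return [s[:3] for s in ordered], [int(s[5:]) for s in ordered]
-- ===== Notes on version B (the rewrite author's own statement) =====
-- stated objective: faster
-- what changed: Replaces A's four outer passes with their quadratic inner membership scans (for each group, for each element, for each code) by one dict mapping each residue code to its group rank and a single bucketing pass over the list, then concatenates the four buckets.
import Mathlib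
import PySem

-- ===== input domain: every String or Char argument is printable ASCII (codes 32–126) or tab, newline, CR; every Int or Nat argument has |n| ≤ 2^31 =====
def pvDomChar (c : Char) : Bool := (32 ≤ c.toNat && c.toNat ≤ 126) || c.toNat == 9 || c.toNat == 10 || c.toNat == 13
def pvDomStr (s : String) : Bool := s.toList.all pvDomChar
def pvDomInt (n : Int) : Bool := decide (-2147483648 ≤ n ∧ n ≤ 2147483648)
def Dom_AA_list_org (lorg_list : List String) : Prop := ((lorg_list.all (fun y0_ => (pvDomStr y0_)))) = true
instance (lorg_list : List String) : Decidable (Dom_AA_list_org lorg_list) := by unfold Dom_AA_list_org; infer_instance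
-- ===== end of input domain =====

-- B replaces A's four repeated passes over the list (each with an inner membership scan over a code list)
-- by one code→group-rank dict and a single bucketing pass; objective: faster (constant factor).

-- ===== PORT A =====
-- s[0:3]
def pvKeyA (s : String) : String := PySem.Str.slice s (some 0) (some 3)

def AA_list_org (lorg_list : List String) : List String × List Int :=
  let hydrophobic_res : List String := ["ALA", "ILE", "LEU", "VAL", "GLY", "PRO", "PHE", "TRP", "MET"]
  let polar_res : List String := ["ASN", "CYS", "GLN", "SER", "THR", "TYR"]
  let neg_res : List String := ["ASP", "GLU"]
  let pos_res : List String := ["ARG", "HIS", "LYS"]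
  let all_res : List (List String) := [pos_res, neg_res, polar_res, hydrophobic_res]
  let arr_list : List String :=
    all_res.foldl (fun acc row =>
      (PySem.List.pyRange 0 (lorg_list.length : Int) 1).foldl (fun acc i =>
        (PySem.List.pyRange 0 (row.length : Int) 1).foldl (fun acc j =>
          if PySem.List.pyGetD row j "" == pvKeyA (PySem.List.pyGetD lorg_list i "") then
            acc ++ [PySem.List.pyGetD lorg_list i ""]
          else acc) acc) acc) []
  -- int(arr_list[i][5:]): ofStr? is none exactly where Python raises ValueError (excluded by Pre_)
  (PySem.List.pyRange 0 (arr_list.length : Int) 1).foldl (fun fl i =>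
    (fl.1 ++ [pvKeyA (PySem.List.pyGetD arr_list i "")],
     fl.2 ++ [(PySem.Int.ofStr? (PySem.Str.slice (PySem.List.pyGetD arr_list i "") (some 5) none)).getD 0]))
    ([], [])

-- ===== PORT B =====
-- s[:3]
def pvKeyB (s : String) : String := PySem.Str.slice s none (some 3)

-- the dict comprehension of Source B: residue code ↦ group rank 0..3 (keys distinct, insertion order)
def pvRank : PySem.Dict String Int := PySem.Dict.mk
  [("ARG", 0), ("HIS", 0), ("LYS", 0),
   ("ASP", 1), ("GLU", 1),
   ("ASN", 2), ("CYS", 2), ("GLN", 2), ("SER", 2), ("THR", 2), ("TYR", 2),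
   ("ALA", 3), ("ILE", 3), ("LEU", 3), ("VAL", 3), ("GLY", 3), ("PRO", 3), ("PHE", 3), ("TRP", 3), ("MET", 3)]

def AA_list_org_alt (lorg_list : List String) : List String × List Int :=
  let buckets : List String × List String × List String × List String :=
    lorg_list.foldl (fun b s =>
      match PySem.Dict.get? pvRank (pvKeyB s) with
      | some 0 => (b.1 ++ [s], b.2.1, b.2.2.1, b.2.2.2)
      | some 1 => (b.1, b.2.1 ++ [s], b.2.2.1, b.2.2.2)
      | some 2 => (b.1, b.2.1, b.2.2.1 ++ [s], b.2.2.2)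
      | some 3 => (b.1, b.2.1, b.2.2.1, b.2.2.2 ++ [s])
      | _ => b) ([], [], [], [])
  let ordered : List String := buckets.1 ++ buckets.2.1 ++ buckets.2.2.1 ++ buckets.2.2.2
  (ordered.map pvKeyB,
   ordered.map (fun s => (PySem.Int.ofStr? (PySem.Str.slice s (some 5) none)).getD 0))

-- ===== PRECONDITION & SPEC =====
-- Pre_ excludes exactly the inputs on which Python A raises ValueError: an element whose first three
-- characters are a residue code but whose tail s[5:] is not an int literal (B raises the same error there).
def Pre_AA_list_org (lorg_list : List String) : Prop :=
  ∀ s ∈ lorg_list,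
    PySem.Str.slice s none (some 3) ∈
      ["ARG", "HIS", "LYS", "ASP", "GLU", "ASN", "CYS", "GLN", "SER", "THR", "TYR",
       "ALA", "ILE", "LEU", "VAL", "GLY", "PRO", "PHE", "TRP", "MET"] →
    (PySem.Int.ofStr? (PySem.Str.slice s (some 5) none)).isSome = true
instance (lorg_list : List String) : Decidable (Pre_AA_list_org lorg_list) := by
  unfold Pre_AA_list_org; infer_instance

def pvWitness_AA_list_org : List String := ["GLY  12", "ARG  3", "XYZ junk", "ASP  -4"]

def Spec_AA_list_org (lorg_list : List String) (out : List String × List Int) : Prop := out = AA_list_org_alt lorg_list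
instance (lorg_list : List String) (out : List String × List Int) : Decidable (Spec_AA_list_org lorg_list out) := by unfold Spec_AA_list_org; infer_instance

-- ===== CLAIM (what is proved, stated in full; the proofs are below) =====
def Claim_equal_AA_list_org : Prop := ∀ (lorg_list : List String), Dom_AA_list_org lorg_list → Pre_AA_list_org lorg_list → Spec_AA_list_org lorg_list (AA_list_org lorg_list)

-- ===== LEMMAS AND PROOFS =====

theorem pvKey_eq : pvKeyA = pvKeyB := by
  funext s
  simp [pvKeyA, pvKeyB, PySem.Str.slice, PySem.List.slice_zero_start]

-- A's innermost loop over a duplicate-free row appends s once iff the key occurs in the row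
theorem pvInner (row : List String) (k s : String) (acc : List String) (hnd : row.Nodup) :
    row.foldl (fun a c => if c == k then a ++ [s] else a) acc
      = if row.contains k then acc ++ [s] else acc := by
  induction row generalizing acc with
  | nil => simp
  | cons c rest ih =>
    rcases List.nodup_cons.mp hnd with ⟨hc, hrest⟩
    rw [List.foldl_cons]
    by_cases hck : c = k
    · subst hck
      rw [if_pos (by simp), ih _ hrest]
      have hrc : rest.contains c = false := by simpa using hc
      rw [hrc]
      simp
    · rw [if_neg (by simpa using hck), ih _ hrest]
      simp [Ne.symm hck]

-- A's middle loop (indices over the list, inner index scan over the row) appends the row's filter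
theorem pvMidR (row : List String) (hnd : row.Nodup) (l acc : List String) :
    (PySem.List.pyRange 0 (l.length : Int) 1).foldl (fun acc i =>
      (PySem.List.pyRange 0 (row.length : Int) 1).foldl (fun a j =>
        if PySem.List.pyGetD row j "" == pvKeyA (PySem.List.pyGetD l i "") then
          a ++ [PySem.List.pyGetD l i ""]
        else a) acc) acc
      = acc ++ l.filter (fun s => row.contains (pvKeyA s)) := by
  rw [PySem.List.foldl_pyRange_zero_pyGetD' l ""
    (fun acc s => (PySem.List.pyRange 0 (row.length : Int) 1).foldl (fun a j =>
      if PySem.List.pyGetD row j "" == pvKeyA s then a ++ [s] else a) acc) acc]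
  induction l generalizing acc with
  | nil => simp
  | cons s rest ih =>
    rw [List.foldl_cons,
      PySem.List.foldl_pyRange_zero_pyGetD' row ""
        (fun a c => if c == pvKeyA s then a ++ [s] else a) acc,
      pvInner row (pvKeyA s) s acc hnd, ih]
    by_cases h : pvKeyA s ∈ row
    · simp [h]
    · simp [h]

-- A's second loop builds the two projections
theorem pvSplitR (arr : List String) :
    (PySem.List.pyRange 0 (arr.length : Int) 1).foldl (fun fl i =>
      (fl.1 ++ [pvKeyA (PySem.List.pyGetD arr i "")],
       fl.2 ++ [(PySem.Int.ofStr? (PySem.Str.slice (PySem.List.pyGetD arr i "") (some 5) none)).getD 0]))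
      ([], [])
      = (arr.map pvKeyA,
         arr.map (fun s => (PySem.Int.ofStr? (PySem.Str.slice s (some 5) none)).getD 0)) := by
  rw [PySem.List.foldl_pyRange_zero_pyGetD' arr ""
    (fun fl s => (fl.1 ++ [pvKeyA s],
      fl.2 ++ [(PySem.Int.ofStr? (PySem.Str.slice s (some 5) none)).getD 0])) ([], []),
    PySem.List.foldl_prod_mk (fun a e => a ++ [pvKeyA e])
      (fun b e => b ++ [(PySem.Int.ofStr? (PySem.Str.slice e (some 5) none)).getD 0]) arr [] [],
    PySem.List.foldl_append_singleton_eq_map, PySem.List.foldl_append_singleton_eq_map]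
  simp

-- every value of the rank dict is none or some 0..3
theorem pvRankCases (k : String) :
    PySem.Dict.get? pvRank k = none ∨ PySem.Dict.get? pvRank k = some 0 ∨
    PySem.Dict.get? pvRank k = some 1 ∨ PySem.Dict.get? pvRank k = some 2 ∨
    PySem.Dict.get? pvRank k = some 3 := by
  by_cases hm : k ∈ (["ARG", "HIS", "LYS", "ASP", "GLU", "ASN", "CYS", "GLN", "SER", "THR", "TYR",
      "ALA", "ILE", "LEU", "VAL", "GLY", "PRO", "PHE", "TRP", "MET"] : List String)
  · fin_cases hm <;> decide
  · left
    rw [PySem.Dict.get?_eq_none_iff_not_mem_keys]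
    simpa [pvRank] using hm

-- B's bucketing pass computes the four group filters
theorem pvBuckets (l : List String) (a0 a1 a2 a3 : List String) :
    l.foldl (fun b s =>
      match PySem.Dict.get? pvRank (pvKeyB s) with
      | some 0 => (b.1 ++ [s], b.2.1, b.2.2.1, b.2.2.2)
      | some 1 => (b.1, b.2.1 ++ [s], b.2.2.1, b.2.2.2)
      | some 2 => (b.1, b.2.1, b.2.2.1 ++ [s], b.2.2.2)
      | some 3 => (b.1, b.2.1, b.2.2.1, b.2.2.2 ++ [s])
      | _ => b) (a0, a1, a2, a3)
      = (a0 ++ l.filter (fun s => PySem.Dict.get? pvRank (pvKeyB s) == some 0),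
         a1 ++ l.filter (fun s => PySem.Dict.get? pvRank (pvKeyB s) == some 1),
         a2 ++ l.filter (fun s => PySem.Dict.get? pvRank (pvKeyB s) == some 2),
         a3 ++ l.filter (fun s => PySem.Dict.get? pvRank (pvKeyB s) == some 3)) := by
  induction l generalizing a0 a1 a2 a3 with
  | nil => simp
  | cons s rest ih =>
    have hc := pvRankCases (pvKeyB s)
    rcases hc with h | h | h | h | h <;>
      simp [List.foldl_cons, h, ih]

-- group membership read back from the rank dict, one Bool equation per group
theorem pvC0 (k : String) :
    (["ARG", "HIS", "LYS"] : List String).contains k = (PySem.Dict.get? pvRank k == some 0) := by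
  by_cases hm : k ∈ (["ARG", "HIS", "LYS", "ASP", "GLU", "ASN", "CYS", "GLN", "SER", "THR", "TYR",
      "ALA", "ILE", "LEU", "VAL", "GLY", "PRO", "PHE", "TRP", "MET"] : List String)
  · fin_cases hm <;> decide
  · have hn : PySem.Dict.get? pvRank k = none := by
      rw [PySem.Dict.get?_eq_none_iff_not_mem_keys]
      simpa [pvRank] using hm
    simp at hm
    simp [hn, hm]
theorem pvC1 (k : String) :
    (["ASP", "GLU"] : List String).contains k = (PySem.Dict.get? pvRank k == some 1) := by
  by_cases hm : k ∈ (["ARG", "HIS", "LYS", "ASP", "GLU", "ASN", "CYS", "GLN", "SER", "THR", "TYR",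
      "ALA", "ILE", "LEU", "VAL", "GLY", "PRO", "PHE", "TRP", "MET"] : List String)
  · fin_cases hm <;> decide
  · have hn : PySem.Dict.get? pvRank k = none := by
      rw [PySem.Dict.get?_eq_none_iff_not_mem_keys]
      simpa [pvRank] using hm
    simp at hm
    simp [hn, hm]
theorem pvC2 (k : String) :
    (["ASN", "CYS", "GLN", "SER", "THR", "TYR"] : List String).contains k
      = (PySem.Dict.get? pvRank k == some 2) := by
  by_cases hm : k ∈ (["ARG", "HIS", "LYS", "ASP", "GLU", "ASN", "CYS", "GLN", "SER", "THR", "TYR",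
      "ALA", "ILE", "LEU", "VAL", "GLY", "PRO", "PHE", "TRP", "MET"] : List String)
  · fin_cases hm <;> decide
  · have hn : PySem.Dict.get? pvRank k = none := by
      rw [PySem.Dict.get?_eq_none_iff_not_mem_keys]
      simpa [pvRank] using hm
    simp at hm
    simp [hn, hm]
theorem pvC3 (k : String) :
    (["ALA", "ILE", "LEU", "VAL", "GLY", "PRO", "PHE", "TRP", "MET"] : List String).contains k
      = (PySem.Dict.get? pvRank k == some 3) := by
  by_cases hm : k ∈ (["ARG", "HIS", "LYS", "ASP", "GLU", "ASN", "CYS", "GLN", "SER", "THR", "TYR",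
      "ALA", "ILE", "LEU", "VAL", "GLY", "PRO", "PHE", "TRP", "MET"] : List String)
  · fin_cases hm <;> decide
  · have hn : PySem.Dict.get? pvRank k = none := by
      rw [PySem.Dict.get?_eq_none_iff_not_mem_keys]
      simpa [pvRank] using hm
    simp at hm
    simp [hn, hm]


-- ===== VERDICT (by name: the statement is the Claim_ definition above) =====
theorem AA_list_org_spec : Claim_equal_AA_list_org := by
  intro lorg_list _dom _pre
  unfold Spec_AA_list_org AA_list_org AA_list_org_alt
  simp only [List.foldl_cons, List.foldl_nil]
  rw [pvMidR _ (by decide), pvMidR _ (by decide), pvMidR _ (by decide), pvMidR _ (by decide),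
    pvSplitR, pvBuckets]
  simp only [pvKey_eq, List.nil_append,
    funext (fun s => pvC0 (pvKeyB s)), funext (fun s => pvC1 (pvKeyB s)),
    funext (fun s => pvC2 (pvKeyB s)), funext (fun s => pvC3 (pvKeyB s)),
    List.append_assoc]
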